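-- pv_equiv track=rewrite | github.com/singleron-RD/sccore | sccore/cli/generate-barcodes.py | max_stretch
-- ===== SOURCE A (Python) =====
-- def max_stretch(s):
--     """returns max stretch of the same letter in string"""
--     max_stretch = 0
--     last = None
--     for n in s:
--         if last is None:
--             last = n
--             stretch = 0
--             continue
--         if n == last:
--             stretch += 1
--             if stretch > max_stretch:
--                 max_stretch = stretch
--         else:
--             stretch = 0
--         last = n
--     return max_stretch
-- ===== SOURCE B (Python) =====
-- def max_stretch(s):
--     """returns max stretch of the same letter in string"""
--     if not s:
--         return 0
--     return _longest_run(s) - 1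
--
--
-- def _longest_run(s):
--     """length of the longest run of equal characters in non-empty s, by divide and conquer:
--     split at the midpoint; a maximal run lies in the left half, the right half, or crosses
--     the midpoint (then its character is left[-1] and its length is the sum of the matching
--     suffix of left and prefix of right)."""
--     if len(s) == 1:
--         return 1
--     mid = len(s) // 2
--     left, right = s[:mid], s[mid:]
--     c = left[-1]
--     cross = _run_back(left, c) + _run_front(right, c)
--     return max(_longest_run(left), _longest_run(right), cross)
--
--
-- def _run_front(s, c):
--     k = 0
--     for ch in s:
--         if ch != c:
--             break
--         k += 1
--     return k
--
--
-- def _run_back(s, c):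
--     k = 0
--     for ch in reversed(s):
--         if ch != c:
--             break
--         k += 1
--     return k
-- ===== Notes on version B (the rewrite author's own statement) =====
-- stated objective: alternative
-- what changed: Replaces A's single-pass last/stretch state machine with a divide-and-conquer algorithm: recursively split the string at the midpoint, and the longest run is the max of the two halves' longest runs and the run crossing the midpoint (matching suffix of the left half plus matching prefix of the right half), minus 1 at the end.
import Mathlib
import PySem

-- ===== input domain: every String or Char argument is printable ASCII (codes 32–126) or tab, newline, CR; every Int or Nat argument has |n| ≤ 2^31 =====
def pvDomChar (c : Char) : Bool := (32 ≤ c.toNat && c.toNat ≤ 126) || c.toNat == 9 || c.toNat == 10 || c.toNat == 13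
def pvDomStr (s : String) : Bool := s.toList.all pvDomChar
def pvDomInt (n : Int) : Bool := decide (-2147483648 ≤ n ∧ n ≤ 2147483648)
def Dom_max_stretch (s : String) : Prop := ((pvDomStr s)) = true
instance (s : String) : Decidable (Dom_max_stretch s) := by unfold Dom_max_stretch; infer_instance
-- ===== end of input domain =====

-- B replaces A's single-pass last/stretch state machine by divide and conquer on the string
-- (halves plus the run crossing the midpoint); alternative algorithm, not claimed faster.

-- ===== PORT A =====
-- A's loop: state (max_stretch, last, stretch); `last is None` happens only before the first char,
-- so the fold is started on the tail with last = first char, stretch = 0.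
def maxStretchLoopA : Int → Char → Int → List Char → Int
  | mx, _, _, [] => mx
  | mx, last, st, n :: rest =>
    if n == last then
      let st' := st + 1
      maxStretchLoopA (if st' > mx then st' else mx) n st' rest
    else
      maxStretchLoopA mx n 0 rest

def max_stretch (s : String) : Int :=
  match s.toList with
  | [] => 0
  | c :: rest => maxStretchLoopA 0 c 0 rest

-- ===== PORT B =====
-- _run_front(s, c): length of the prefix of s consisting of c
def runFront (c : Char) : List Char → Int
  | [] => 0
  | d :: ds => if d == c then 1 + runFront c ds else 0

-- _run_back(s, c): length of the suffix of s consisting of c (loop over reversed(s))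
def runBack (c : Char) (l : List Char) : Int := runFront c l.reverse

-- _longest_run(s): divide and conquer; the [] case is an unreachable totality guard
-- (Python never calls _longest_run on the empty string).
def longestRun : List Char → Int
  | [] => 0
  | [_] => 1
  | x :: y :: t =>
    let mid := (x :: y :: t).length / 2
    let left := (x :: y :: t).take mid
    let right := (x :: y :: t).drop mid
    let c := left.getLast?.getD ' '
    max (max (longestRun left) (longestRun right)) (runBack c left + runFront c right)
termination_by l => l.length
decreasing_by
  all_goals simp [List.length_take]
  all_goals omega

def max_stretch_alt (s : String) : Int :=
  if s.toList.isEmpty then 0 else longestRun s.toList - 1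

-- ===== PRECONDITION & SPEC =====
def Spec_max_stretch (s : String) (out : Int) : Prop := out = max_stretch_alt s
instance (s : String) (out : Int) : Decidable (Spec_max_stretch s out) := by unfold Spec_max_stretch; infer_instance

-- ===== CLAIM (what is proved, stated in full; the proofs are below) =====
def Claim_equal_max_stretch : Prop := ∀ (s : String), Dom_max_stretch s → Spec_max_stretch s (max_stretch s)

-- ===== LEMMAS AND PROOFS =====

-- Reference value: the list of maximal-run lengths of a string, and its max (default 0).
def runLensGo (c : Char) (n : Int) : List Char → List Int
  | [] => [n]
  | d :: ds => if d == c then runLensGo c (n + 1) ds else n :: runLensGo d 1 ds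

def runLens : List Char → List Int
  | [] => []
  | c :: cs => runLensGo c 1 cs

def maxD (l : List Int) : Int := (l.max?).getD 0

lemma runLensGo_ne_nil (c : Char) (n : Int) (l : List Char) : runLensGo c n l ≠ [] := by
  induction l generalizing c n with
  | nil => simp [runLensGo]
  | cons d ds ih =>
    simp only [runLensGo]
    split <;> simp [ih]

lemma foldl_max_max (a b : Int) (l : List Int) :
    l.foldl max (max a b) = max a (l.foldl max b) := by
  induction l generalizing b with
  | nil => rfl
  | cons x xs ih =>
    simp only [List.foldl_cons]
    rw [max_assoc, ih]

lemma maxD_cons (a : Int) (l : List Int) : maxD (a :: l) = l.foldl max a := by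
  simp [maxD, List.max?]

lemma runFront_nonneg (c : Char) (l : List Char) : 0 ≤ runFront c l := by
  induction l with
  | nil => simp [runFront]
  | cons d ds ih => simp only [runFront]; split <;> omega

-- runLensGo unrolled: the pending run absorbs the matching prefix, then restart
lemma runLensGo_eq (a : Char) (n : Int) (xs : List Char) :
    runLensGo a n xs = (n + runFront a xs) :: runLens (xs.dropWhile (· == a)) := by
  induction xs generalizing a n with
  | nil => simp [runLensGo, runFront, List.dropWhile, runLens]
  | cons d ds ih =>
    simp only [runLensGo, runFront, List.dropWhile]
    by_cases h : d = a
    · subst h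
      simp only [BEq.rfl, if_true]
      rw [ih]
      congr 1
      ring
    · have hb : (d == a) = false := beq_eq_false_iff_ne.mpr h
      simp [hb, runLens]

lemma maxD_cons_eq_max (x : Int) (l : List Char) (hx : 0 ≤ x) :
    maxD (x :: runLens l) = max x (maxD (runLens l)) := by
  cases l with
  | nil =>
    show maxD [x] = max x (maxD [])
    simp [maxD, List.max?]
    omega
  | cons b bs =>
    rw [show runLens (b :: bs) = runLensGo b 1 bs from rfl, runLensGo_eq]
    rw [maxD_cons, List.foldl_cons, foldl_max_max, ← maxD_cons]

lemma maxD_runLens_cons (a : Char) (xs : List Char) :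
    maxD (runLens (a :: xs))
      = max (1 + runFront a xs) (maxD (runLens (xs.dropWhile (· == a)))) := by
  rw [show runLens (a :: xs) = runLensGo a 1 xs from rfl, runLensGo_eq]
  exact maxD_cons_eq_max _ _ (by have := runFront_nonneg a xs; omega)

lemma maxD_runLens_nonneg (l : List Char) : 0 ≤ maxD (runLens l) := by
  cases l with
  | nil => simp [runLens, maxD, List.max?]
  | cons a xs =>
    rw [maxD_runLens_cons]
    have := runFront_nonneg a xs
    omega

lemma runFront_append (c : Char) (u v : List Char) :
    runFront c (u ++ v)
      = if u.all (· == c) then (u.length : Int) + runFront c v else runFront c u := by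
  induction u with
  | nil => simp [runFront]
  | cons d ds ih =>
    simp only [List.cons_append, runFront, List.all_cons]
    by_cases h : d = c
    · subst h
      simp only [BEq.rfl, if_true, Bool.true_and, ih]
      split
      · simp only [List.length_cons]
        push_cast
        ring
      · rfl
    · have hb : (d == c) = false := beq_eq_false_iff_ne.mpr h
      simp [hb]

lemma runFront_all (c : Char) (u : List Char) (h : u.all (· == c) = true) :
    runFront c u = u.length := by
  have := runFront_append c u []
  simpa [h, runFront] using this

lemma runFront_zero_of_all_ne (a c : Char) (hne : c ≠ a) (u : List Char)
    (h : u.all (· == a) = true) : runFront c u = 0 := by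
  cases u with
  | nil => simp [runFront]
  | cons d ds =>
    simp only [List.all_cons, Bool.and_eq_true, beq_iff_eq] at h
    obtain ⟨rfl, _⟩ := h
    have hb : (d == c) = false := beq_eq_false_iff_ne.mpr (fun he => hne he.symm)
    simp [runFront, hb]

lemma getLast?_cons_ne (x : Char) (m : List Char) (h : m ≠ []) :
    (x :: m).getLast? = m.getLast? := by
  obtain ⟨z, zs, rfl⟩ := List.exists_cons_of_ne_nil h
  exact List.getLast?_cons_cons

lemma getLast?_dropWhile (p : Char → Bool) (m : List Char)
    (h : m.dropWhile p ≠ []) : (m.dropWhile p).getLast? = m.getLast? := by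
  induction m with
  | nil => simp [List.dropWhile] at h
  | cons x m' ih =>
    simp only [List.dropWhile] at h ⊢
    by_cases hx : p x
    · simp only [hx] at h ⊢
      have hm' : m' ≠ [] := by
        intro he; subst he; simp [List.dropWhile] at h
      rw [ih h, getLast?_cons_ne x m' hm']
    · simp [hx]

lemma getLast?_all (a : Char) (xs : List Char) (h : xs.all (· == a) = true) (d : Char) :
    ((a :: xs).getLast?).getD d = a := by
  induction xs generalizing a with
  | nil => simp
  | cons x xs' ih =>
    simp only [List.all_cons, Bool.and_eq_true, beq_iff_eq] at h
    obtain ⟨rfl, h2⟩ := h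
    rw [List.getLast?_cons_cons]
    exact ih x h2

lemma head_dropWhile_ne (p : Char → Bool) (m : List Char) (y : Char) (ys : List Char)
    (h : m.dropWhile p = y :: ys) : p y = false := by
  induction m with
  | nil => simp [List.dropWhile] at h
  | cons x m' ih =>
    rw [List.dropWhile_cons] at h
    by_cases hx : p x
    · rw [if_pos hx] at h; exact ih h
    · rw [if_neg hx] at h
      cases h
      simpa using hx

-- the suffix run of a :: xs is the suffix run of xs with its leading a-run removed
lemma runBack_cons_drop (a c : Char) (xs : List Char) (h : xs.dropWhile (· == a) ≠ []) :
    runBack c (a :: xs) = runBack c (xs.dropWhile (· == a)) := by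
  obtain ⟨y, ys, hy⟩ := List.exists_cons_of_ne_nil h
  have hsplit : a :: xs = (a :: xs.takeWhile (· == a)) ++ xs.dropWhile (· == a) := by
    simp [List.takeWhile_append_dropWhile]
  have htw : ((a :: xs.takeWhile (· == a)).reverse).all (· == a) = true := by
    simp only [List.all_reverse, List.all_cons, BEq.rfl, Bool.true_and]
    exact List.all_eq_true.mpr (fun x hx => List.mem_takeWhile_imp (p := (· == a)) hx)
  rw [runBack, hsplit, List.reverse_append, runFront_append]
  by_cases hall : ((xs.dropWhile (· == a)).reverse).all (· == c) = true
  · have hya : (y == a) = false := head_dropWhile_ne _ xs y ys hy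
    have hyc : y = c := by
      have : y ∈ (xs.dropWhile (· == a)).reverse := by simp [hy]
      have := List.all_eq_true.mp hall _ this
      exact beq_iff_eq.mp this
    have hca : c ≠ a := by
      subst hyc
      exact fun he => by simp [he] at hya
    rw [if_pos hall, runFront_zero_of_all_ne a c hca _ htw,
        runBack, runFront_all c _ hall]
    simp
  · rw [if_neg hall, runBack]

-- Crossing-run decomposition: the max run of l ++ r is the max of the two sides' max runs
-- and the run crossing the boundary (whose character is l's last character)
lemma maxD_append : ∀ (n : Nat) (l r : List Char), l.length ≤ n → l ≠ [] → r ≠ [] →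
    maxD (runLens (l ++ r))
      = max (max (maxD (runLens l)) (maxD (runLens r)))
          (runBack (l.getLast?.getD ' ') l + runFront (l.getLast?.getD ' ') r) := by
  intro n
  induction n with
  | zero =>
    intro l r hlen hl _
    cases l with
    | nil => exact absurd rfl hl
    | cons a xs => simp at hlen
  | succ n ih =>
    intro l r hlen hl hr
    obtain ⟨a, xs, rfl⟩ := List.exists_cons_of_ne_nil hl
    obtain ⟨b, r', rfl⟩ := List.exists_cons_of_ne_nil hr
    by_cases hall : xs.all (· == a) = true
    · -- Case A: a :: xs is one run of a's
      have hdw : xs.dropWhile (· == a) = [] := by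
        rw [List.dropWhile_eq_nil_iff]
        intro x hx
        exact List.all_eq_true.mp hall x hx
      have hc : ((a :: xs).getLast?).getD ' ' = a := getLast?_all a xs hall ' '
      have hback : runBack a (a :: xs) = ((a :: xs).length : Int) := by
        rw [runBack, runFront_all]
        · simp
        · simp only [List.all_reverse, List.all_cons, BEq.rfl, Bool.true_and]
          exact hall
      have hMl : maxD (runLens (a :: xs)) = 1 + (xs.length : Int) := by
        rw [maxD_runLens_cons, hdw, runFront_all a xs hall]
        show max _ (maxD []) = _
        simp [maxD, List.max?]
        omega
      have hfront : runFront a (xs ++ b :: r') = (xs.length : Int) + runFront a (b :: r') := by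
        rw [runFront_append, if_pos hall]
      have hdrop : (xs ++ b :: r').dropWhile (· == a) = (b :: r').dropWhile (· == a) := by
        rw [List.dropWhile_append, hdw]
        simp
      rw [List.cons_append, maxD_runLens_cons, hfront, hdrop, hc, hback]
      by_cases hba : b = a
      · subst hba
        have hf : runFront b (b :: r') = 1 + runFront b r' := by simp [runFront]
        have hd : (b :: r').dropWhile (· == b) = r'.dropWhile (· == b) := by
          simp [List.dropWhile]
        rw [hf, hd, hMl, maxD_runLens_cons b r']
        have h1 := runFront_nonneg b r'
        have h2 := maxD_runLens_nonneg (r'.dropWhile (· == b))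
        simp only [List.length_cons]
        push_cast
        omega
      · have hba' : (b == a) = false := beq_eq_false_iff_ne.mpr hba
        have hf : runFront a (b :: r') = 0 := by simp [runFront, hba']
        have hd : (b :: r').dropWhile (· == a) = b :: r' := by
          simp [List.dropWhile, hba']
        rw [hf, hd, hMl]
        have h2 := maxD_runLens_nonneg (b :: r')
        simp only [List.length_cons]
        push_cast
        omega
    · -- Case B: the first run of a's ends inside a :: xs
      have hdw : xs.dropWhile (· == a) ≠ [] := by
        intro he
        rw [List.dropWhile_eq_nil_iff] at he
        exact hall (List.all_eq_true.mpr he)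
      have hxs : xs ≠ [] := by
        intro he; subst he; simp [List.dropWhile] at hdw
      have hfront : runFront a (xs ++ b :: r') = runFront a xs := by
        rw [runFront_append, if_neg (by simpa using hall)]
      have hdrop : (xs ++ b :: r').dropWhile (· == a)
          = xs.dropWhile (· == a) ++ b :: r' := by
        rw [List.dropWhile_append]
        simp [List.isEmpty_iff, hdw]
      have hc : ((a :: xs).getLast?).getD ' '
          = ((xs.dropWhile (· == a)).getLast?).getD ' ' := by
        rw [getLast?_dropWhile _ xs hdw, getLast?_cons_ne a xs hxs]
      have hlen' : (xs.dropWhile (· == a)).length ≤ n := by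
        have := List.length_dropWhile_le (· == a) xs
        simp only [List.length_cons] at hlen
        omega
      have hIH := ih (xs.dropWhile (· == a)) (b :: r') hlen' hdw hr
      rw [List.cons_append, maxD_runLens_cons, hdrop, hIH, maxD_runLens_cons a xs,
          hc, runBack_cons_drop a _ xs hdw]
      have h1 := runFront_nonneg a xs
      have h2 := maxD_runLens_nonneg (xs.dropWhile (· == a))
      have h3 := maxD_runLens_nonneg (b :: r')
      omega

-- B computes the max run length on nonempty lists
lemma longestRun_eq : ∀ (n : Nat) (l : List Char), l.length ≤ n → l ≠ [] →
    longestRun l = maxD (runLens l) := by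
  intro n
  induction n with
  | zero =>
    intro l hlen hl
    cases l with
    | nil => exact absurd rfl hl
    | cons a xs => simp at hlen
  | succ n ih =>
    intro l hlen hl
    match l with
    | [x] => simp [longestRun, runLens, runLensGo, maxD, List.max?]
    | x :: y :: t =>
      rw [longestRun]
      have hmid1 : 1 ≤ (x :: y :: t).length / 2 := by simp; omega
      have hmid2 : (x :: y :: t).length / 2 < (x :: y :: t).length := by simp; omega
      have htake : ((x :: y :: t).take ((x :: y :: t).length / 2)).length
          = (x :: y :: t).length / 2 := by
        rw [List.length_take]
        omega
      have htne : (x :: y :: t).take ((x :: y :: t).length / 2) ≠ [] := by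
        intro he
        have h2 := congrArg List.length he
        rw [htake] at h2
        simp only [List.length_nil, List.length_cons] at h2
        omega
      have hdne : (x :: y :: t).drop ((x :: y :: t).length / 2) ≠ [] := by
        intro he
        have h2 := congrArg List.length he
        rw [List.length_drop] at h2
        simp only [List.length_nil, List.length_cons] at h2
        omega
      have hlt : ((x :: y :: t).take ((x :: y :: t).length / 2)).length ≤ n := by
        rw [htake]
        simp only [List.length_cons] at hlen ⊢
        omega
      have hld : ((x :: y :: t).drop ((x :: y :: t).length / 2)).length ≤ n := by
        rw [List.length_drop]
        simp only [List.length_cons] at hlen ⊢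
        omega
      rw [ih _ hlt htne, ih _ hld hdne,
          ← maxD_append n _ _ hlt htne hdne, List.take_append_drop]

-- A's loop: the max of (run length - 1)
lemma maxD_runLensGo_ge (c : Char) (n : Int) (l : List Char) :
    n - 1 ≤ maxD ((runLensGo c n l).map (fun m => m - 1)) := by
  induction l generalizing c n with
  | nil => simp [runLensGo, maxD, List.max?]
  | cons d ds ih =>
    simp only [runLensGo]
    split
    · calc n - 1 ≤ (n + 1) - 1 := by omega
        _ ≤ _ := ih c (n + 1)
    · obtain ⟨b, L, hb⟩ := List.exists_cons_of_ne_nil (runLensGo_ne_nil d 1 ds)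
      simp only [hb, List.map_cons, maxD_cons, List.foldl_cons]
      rw [foldl_max_max]
      exact le_max_left _ _

lemma loopA_eq (l : List Char) (mx st : Int) (c : Char) (h0 : 0 ≤ st) (h : st ≤ mx) :
    maxStretchLoopA mx c st l
      = max mx (maxD ((runLensGo c (st + 1) l).map (fun m => m - 1))) := by
  induction l generalizing mx st c with
  | nil =>
    simp only [maxStretchLoopA, runLensGo, List.map_cons, List.map_nil, maxD_cons,
      List.foldl_nil]
    omega
  | cons n rest ih =>
    simp only [maxStretchLoopA, runLensGo]
    by_cases hnc : n = c
    · subst hnc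
      simp only [BEq.rfl, if_true]
      rw [ih _ _ _ (by omega) (by omega : st + 1 ≤ if st + 1 > mx then st + 1 else mx)]
      have hge := maxD_runLensGo_ge n (st + 1 + 1) rest
      have hif : (if st + 1 > mx then st + 1 else mx) = max mx (st + 1) := by
        split <;> omega
      rw [hif]
      omega
    · have hb' : (n == c) = false := beq_eq_false_iff_ne.mpr hnc
      simp only [hb', Bool.false_eq_true, if_false]
      rw [ih _ _ _ le_rfl (le_trans h0 h)]
      have h01 : (0 : Int) + 1 = 1 := by omega
      rw [h01]
      obtain ⟨b, L, hb⟩ := List.exists_cons_of_ne_nil (runLensGo_ne_nil n 1 rest)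
      simp only [hb, List.map_cons, maxD_cons, List.foldl_cons, foldl_max_max]
      omega

lemma maxD_map_sub_one (t : List Int) : ∀ (h : Int),
    (t.map (fun m => m - 1)).foldl max (h - 1) = t.foldl max h - 1 := by
  induction t with
  | nil => intro h; simp
  | cons x xs ih =>
    intro h
    simp only [List.map_cons, List.foldl_cons]
    have hmx : max (h - 1) (x - 1) = max h x - 1 := by omega
    rw [hmx, ih]

-- ===== VERDICT (by name: the statement is the Claim_ definition above) =====
theorem max_stretch_spec : Claim_equal_max_stretch := by
  intro s _
  unfold Spec_max_stretch
  cases h : s.toList with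
  | nil => simp [max_stretch, max_stretch_alt, h]
  | cons c rest =>
    simp only [max_stretch, max_stretch_alt, h, List.isEmpty_cons, Bool.false_eq_true,
      if_false]
    rw [longestRun_eq (c :: rest).length _ le_rfl (by simp),
        loopA_eq rest 0 0 c le_rfl le_rfl]
    have h01 : (0 : Int) + 1 = 1 := by omega
    rw [h01]
    have hge := maxD_runLensGo_ge c 1 rest
    obtain ⟨b, L, hb⟩ := List.exists_cons_of_ne_nil (runLensGo_ne_nil c 1 rest)
    have hsub : maxD ((runLensGo c 1 rest).map (fun m => m - 1))
        = maxD (runLensGo c 1 rest) - 1 := by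
      rw [hb]
      simp only [List.map_cons, maxD_cons]
      exact maxD_map_sub_one L b
    rw [hsub] at hge ⊢
    show _ = maxD (runLensGo c 1 rest) - 1
    omega
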